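-- pv_equiv track=rewrite | github.com/Pratyush219/Final-Year-Project-Source-Code | code/ap_utils.py | modified_get_frequent
-- ===== SOURCE A (Python) =====
-- import heapq
--
-- def count_occurences(itemset, transactions):
--     count = 0
--     for transaction in transactions:
--         if set(itemset).issubset(set(transaction)):
--             count += 1
--     return count
--
-- def modified_get_frequent(itemsets, transactions, n_itemsets, order):
--     # Store the support counts of all the itemsets
--     support_counts_for_items = [(itemset, count_occurences(itemset, transactions)) for itemset in itemsets]
--     # heapq implements min-heap by default but we want a max-heap. In order to simulate that
--     # behaviour, we multiply the support counts with -1. The most negative value will be the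
--     # minimum and will be at the top of the heap.
--     counts = [-item[1] for item in support_counts_for_items]
--
--     # heapify the counts list
--     heapq.heapify(counts)
--     # Stores the list of frequent itemsets along with their support
--     frequent_itemsets_with_support = list()
--     # Stores the list of frequent itemsets
--     frequent_itemsets = list()
--     # Stores the list of support counts of frequent itemsets
--     support = list()
--     # A set that is used to track whether an itemset has already been added to frequent_itemsets
--     added = set()
--     num_itemsets_added = 0
--     while num_itemsets_added < n_itemsets and len(counts) != 0:
--         count = heapq.heappop(counts)
--         # Iterate through all the itemsets
--         for item, supp in support_counts_for_items:
--             # If support of current itemset is equal to count and it has not been added to frequent_itemsets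
--             if supp == -count and str(item) not in added:
--                 frequent_itemsets_with_support.append([item, supp])
--                 added.add(str(item))
--         num_itemsets_added += 1
--
--     # Sort the itemsets in the correct order ot allow joining of itemsets
--     frequent_itemsets_with_support.sort(key=lambda x: tuple(order.index(d.split(',')[0]) for d in x[0]))
--     # First item of each entry is an itemset
--     frequent_itemsets = [entry[0] for entry in frequent_itemsets_with_support]
--     # Second item of each entry is support count
--     support = [entry[1] for entry in frequent_itemsets_with_support]
--     return frequent_itemsets, support
-- ===== SOURCE B (Python) =====
-- def count_occurences(itemset, transactions):
--     return sum(1 for transaction in transactions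
--                if set(itemset).issubset(set(transaction)))
--
-- def modified_get_frequent(itemsets, transactions, n_itemsets, order):
--     pairs = [(itemset, count_occurences(itemset, transactions)) for itemset in itemsets]
--     if n_itemsets <= 0 or not pairs:
--         return [], []
--     counts_desc = sorted((c for _, c in pairs), reverse=True)
--     threshold = counts_desc[min(n_itemsets, len(pairs)) - 1]
--     # every itemset whose support reaches the min(n, len)-th largest support is selected,
--     # in descending-support order with ties in original order (stable sort), skipping
--     # repeated identical itemsets
--     seen = set()
--     selected = []
--     for itemset, c in sorted(pairs, key=lambda p: -p[1]):
--         if c >= threshold and tuple(itemset) not in seen: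
--             seen.add(tuple(itemset))
--             selected.append([itemset, c])
--     selected.sort(key=lambda e: tuple(order.index(d.split(',')[0]) for d in e[0]))
--     return [e[0] for e in selected], [e[1] for e in selected]
-- ===== Notes on version B (the rewrite author's own statement) =====
-- stated objective: simpler
-- what changed: Replaces the heap simulation (heapify the negated counts, pop min(n,len) times and rescan the whole itemset list after every pop) by computing the min(n,len)-th largest support once as a threshold and selecting everything at or above it in a single stable descending-support pass.
-- outside the precondition, e.g. on modified_get_frequent([['a'], ['x']], [['a']], 1, ['a']): A returns ([['a']], [1]), B returns ([['a']], [1])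
import Mathlib
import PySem

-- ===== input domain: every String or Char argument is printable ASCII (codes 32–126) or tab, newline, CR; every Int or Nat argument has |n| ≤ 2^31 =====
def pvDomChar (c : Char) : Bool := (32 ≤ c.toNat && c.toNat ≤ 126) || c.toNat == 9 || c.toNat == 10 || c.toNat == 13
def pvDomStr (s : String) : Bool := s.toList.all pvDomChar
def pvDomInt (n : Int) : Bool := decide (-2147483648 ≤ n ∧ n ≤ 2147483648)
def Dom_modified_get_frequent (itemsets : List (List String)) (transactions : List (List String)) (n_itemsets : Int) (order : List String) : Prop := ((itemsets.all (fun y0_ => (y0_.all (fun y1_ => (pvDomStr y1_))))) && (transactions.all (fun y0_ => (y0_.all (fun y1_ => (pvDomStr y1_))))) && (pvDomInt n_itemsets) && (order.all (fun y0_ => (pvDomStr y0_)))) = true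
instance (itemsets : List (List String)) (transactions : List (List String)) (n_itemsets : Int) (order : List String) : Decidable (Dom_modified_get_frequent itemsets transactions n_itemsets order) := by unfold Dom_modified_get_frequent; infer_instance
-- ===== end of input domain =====

-- B replaces A's heap simulation (min(n,len) heappops, each followed by a full rescan of all
-- itemsets) by computing the min(n,len)-th largest support as a threshold and making one stable
-- descending-support pass that keeps every itemset at or above it; same return value.

-- ===== PORT A =====
-- set(itemset).issubset(set(transaction)) ⇔ every member of itemset occurs in transaction (exact)
def pvSubset (itemset t : List String) : Bool := itemset.all (fun x => t.contains x)

def pvCountOcc (itemset : List String) (transactions : List (List String)) : Int :=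
  transactions.foldl (fun count t => if pvSubset itemset t then count + 1 else count) 0

-- key=lambda x: tuple(order.index(d.split(',')[0]) for d in x[0]); order.index total under
-- Pre_ (the .getD 0 default is never reached there)
def pvOrderKey (order : List String) (it : List String) : List Int :=
  it.map (fun d => (((PySem.List.index? order (((PySem.Str.split? d ",").getD []).headD "")).getD 0 : Nat) : Int))

-- the while loop: one iteration per heappop; 'added' tracks str(item) — ported as the itemset's
-- list value, exact because repr is injective on lists of strings
def pvALoop (scfi : List (List String × Int)) (n : Int) :
    List Int → Int → (List (List String × Int) × PySem.Set (List String)) → List (List String × Int)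
  | [], _, st => st.1
  | c :: rest, numAdded, st =>
    if numAdded < n then
      pvALoop scfi n rest (numAdded + 1)
        (scfi.foldl (fun st p =>
          if p.2 == -c && !(st.2.contains p.1) then (st.1 ++ [p], st.2.add p.1) else st) st)
    else st.1

def modified_get_frequent (itemsets : List (List String)) (transactions : List (List String)) (n_itemsets : Int) (order : List String) : List (List String) × List Int :=
  let scfi := itemsets.map (fun itemset => (itemset, pvCountOcc itemset transactions))
  -- heapify + repeated heappop always pops the current minimum: the sequence of popped values is
  -- the ascending sort of the (negated) counts — exact, Int values equal under == are identical
  let counts := PySem.List.sorted (scfi.map (fun item => -item.2)) (fun c => c)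
  let fiws := pvALoop scfi n_itemsets counts 0 ([], PySem.Set.ofList [])
  let fiws := PySem.List.sorted fiws (fun x => pvOrderKey order x.1)
  (fiws.map (fun e => e.1), fiws.map (fun e => e.2))

-- ===== PORT B =====
def pvCountOccAlt (itemset : List String) (transactions : List (List String)) : Int :=
  ((transactions.filter (fun t => pvSubset itemset t)).length : Int)

def modified_get_frequent_alt (itemsets : List (List String)) (transactions : List (List String)) (n_itemsets : Int) (order : List String) : List (List String) × List Int :=
  let pairs := itemsets.map (fun itemset => (itemset, pvCountOccAlt itemset transactions))
  if n_itemsets ≤ 0 ∨ pairs = [] then ([], [])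
  else
    let countsDesc := PySem.List.sorted (pairs.map (fun p => p.2)) (fun c => c) true
    -- index provably in range here (1 ≤ min n len ≤ len), the .getD 0 default is never reached
    let threshold := (PySem.List.pyGet? countsDesc (min n_itemsets (pairs.length : Int) - 1)).getD 0
    let selected := (PySem.List.sorted pairs (fun p => -p.2)).foldl
      (fun st p =>
        if decide (threshold ≤ p.2) && !(st.2.contains p.1) then (st.1 ++ [p], st.2.add p.1) else st)
      ([], PySem.Set.ofList [])
    let sel := PySem.List.sorted selected.1 (fun e => pvOrderKey order e.1)
    (sel.map (fun e => e.1), sel.map (fun e => e.2))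

-- ===== PRECONDITION & SPEC =====
-- Pre_ excludes inputs on which the final sort's key can hit order.index of a missing value
-- (ValueError). It requires every itemset's entries to have their first comma-field in `order`
-- (unless n_itemsets ≤ 0, where the sort is over the empty list); this is slightly narrower than
-- A's exact domain, which raises only when a SELECTED itemset has a missing field — see the cite.
def Pre_modified_get_frequent (itemsets : List (List String)) (transactions : List (List String)) (n_itemsets : Int) (order : List String) : Prop :=
  n_itemsets ≤ 0 ∨ ∀ itemset ∈ itemsets, ∀ d ∈ itemset, (((PySem.Str.split? d ",").getD []).headD "") ∈ order
instance (itemsets : List (List String)) (transactions : List (List String)) (n_itemsets : Int) (order : List String) : Decidable (Pre_modified_get_frequent itemsets transactions n_itemsets order) := by unfold Pre_modified_get_frequent; infer_instance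

def pvWitness_modified_get_frequent : List (List String) × List (List String) × Int × List String :=
  ([["a"], ["b"]], [["a", "b"], ["a"]], 1, ["a", "b"])

def Spec_modified_get_frequent (itemsets : List (List String)) (transactions : List (List String)) (n_itemsets : Int) (order : List String) (out : List (List String) × List Int) : Prop := out = modified_get_frequent_alt itemsets transactions n_itemsets order
instance (itemsets : List (List String)) (transactions : List (List String)) (n_itemsets : Int) (order : List String) (out : List (List String) × List Int) : Decidable (Spec_modified_get_frequent itemsets transactions n_itemsets order out) := by unfold Spec_modified_get_frequent; infer_instance

-- ===== CLAIM (what is proved, stated in full; the proofs are below) =====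
def Claim_equal_modified_get_frequent : Prop := ∀ (itemsets : List (List String)) (transactions : List (List String)) (n_itemsets : Int) (order : List String), Dom_modified_get_frequent itemsets transactions n_itemsets order → Pre_modified_get_frequent itemsets transactions n_itemsets order → Spec_modified_get_frequent itemsets transactions n_itemsets order (modified_get_frequent itemsets transactions n_itemsets order)

-- ===== LEMMAS AND PROOFS =====

theorem pvCountOcc_eq (itemset : List String) (transactions : List (List String)) :
    pvCountOcc itemset transactions = pvCountOccAlt itemset transactions := by
  unfold pvCountOcc pvCountOccAlt
  rw [PySem.List.foldl_if_add_one]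
  simp [List.countP_eq_length_filter]

def pvSelGrow (s : PySem.Set (List String)) :
    List (List String × Int) → List (List String × Int) × PySem.Set (List String)
  | [] => ([], s)
  | p :: ps =>
    if s.contains p.1 then pvSelGrow s ps
    else ((p :: (pvSelGrow (s.add p.1) ps).1), (pvSelGrow (s.add p.1) ps).2)

theorem pvScan_eq (cond : List String × Int → Bool) (l : List (List String × Int))
    (acc : List (List String × Int)) (s : PySem.Set (List String)) :
    l.foldl (fun st p =>
        if cond p && !(st.2.contains p.1) then (st.1 ++ [p], st.2.add p.1) else st) (acc, s)
      = (acc ++ (pvSelGrow s (l.filter cond)).1, (pvSelGrow s (l.filter cond)).2) := by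
  induction l generalizing acc s with
  | nil => simp [pvSelGrow]
  | cons p ps ih =>
    simp only [List.foldl_cons, List.filter_cons]
    by_cases hc : cond p = true
    · by_cases hm : s.contains p.1 = true
      · simp only [hc, hm, Bool.not_true, Bool.and_false, Bool.false_eq_true, if_neg,
          not_false_iff, if_pos, pvSelGrow, ih]
      · have hm' : s.contains p.1 = false := by simpa using hm
        simp only [hc, hm', Bool.not_false, Bool.and_true, if_pos, pvSelGrow, Bool.false_eq_true,
          if_neg, not_false_iff, ih]
        simp
    · have hc' : cond p = false := by simpa using hc
      simp only [hc', Bool.false_and, Bool.false_eq_true, if_neg, not_false_iff, ih]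

theorem pvSelGrow_append (l₁ l₂ : List (List String × Int)) (s : PySem.Set (List String)) :
    pvSelGrow s (l₁ ++ l₂)
      = ((pvSelGrow s l₁).1 ++ (pvSelGrow (pvSelGrow s l₁).2 l₂).1,
         (pvSelGrow (pvSelGrow s l₁).2 l₂).2) := by
  induction l₁ generalizing s with
  | nil => simp [pvSelGrow]
  | cons p ps ih =>
    simp only [List.cons_append, pvSelGrow]
    by_cases hm : s.contains p.1 = true
    · simp only [hm, if_pos, ih]
    · simp only [hm, Bool.false_eq_true, if_neg, not_false_iff, ih]
      simp

theorem pvSelGrow_snd_mem (l : List (List String × Int)) (s : PySem.Set (List String))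
    (x : List String) (h : x ∈ s ∨ ∃ p ∈ l, p.1 = x) : x ∈ (pvSelGrow s l).2 := by
  induction l generalizing s with
  | nil =>
    simp only [pvSelGrow]
    rcases h with h | ⟨q, hq, _⟩
    · exact h
    · simp at hq
  | cons p ps ih =>
    by_cases hm : s.contains p.1 = true
    · simp only [pvSelGrow, hm, if_pos]
      apply ih
      rcases h with h | ⟨q, hq, hqx⟩
      · tauto
      · rcases List.mem_cons.mp hq with rfl | hq'
        · left; rw [← hqx]; exact List.contains_iff_mem.mp hm
        · right; exact ⟨q, hq', hqx⟩
    · simp only [pvSelGrow, hm, Bool.false_eq_true, if_neg, not_false_iff]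
      apply ih
      rcases h with h | ⟨q, hq, hqx⟩
      · left; rw [PySem.Set.mem_add]; tauto
      · rcases List.mem_cons.mp hq with rfl | hq'
        · left; rw [PySem.Set.mem_add]; tauto
        · right; exact ⟨q, hq', hqx⟩

theorem pvSelGrow_all_mem (l : List (List String × Int)) (s : PySem.Set (List String))
    (h : ∀ p ∈ l, p.1 ∈ s) : pvSelGrow s l = ([], s) := by
  induction l with
  | nil => simp [pvSelGrow]
  | cons p ps ih =>
    have hc : s.contains p.1 = true := List.contains_iff_mem.mpr (h p (by simp))
    simp only [pvSelGrow, hc, if_pos]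
    exact ih fun q hq => h q (by simp [hq])

def pvDistinct : List Int → List Int
  | [] => []
  | a :: ws => a :: (pvDistinct ws).filter (fun v => v ≠ a)

theorem mem_pvDistinct (ws : List Int) (v : Int) : v ∈ pvDistinct ws ↔ v ∈ ws := by
  induction ws with
  | nil => simp [pvDistinct]
  | cons a t ih =>
    simp only [pvDistinct, List.mem_cons, List.mem_filter, ih]
    by_cases hv : v = a <;> simp [hv]

theorem pairwise_lt_pvDistinct (ws : List Int) (h : ws.Pairwise (· ≤ ·)) :
    (pvDistinct ws).Pairwise (· < ·) := by
  induction ws with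
  | nil => simp [pvDistinct]
  | cons a t ih =>
    rcases List.pairwise_cons.mp h with ⟨ha, ht⟩
    refine List.pairwise_cons.mpr ⟨?_, List.Pairwise.filter _ (ih ht)⟩
    intro b hb
    rcases List.mem_filter.mp hb with ⟨hb', hne⟩
    have hba : b ∈ t := (mem_pvDistinct t b).mp hb'
    have := ha b hba
    simp at hne
    omega

theorem pvEq_of_pairwise_lt_of_mem_iff (l₁ l₂ : List Int) (h₁ : l₁.Pairwise (· < ·))
    (h₂ : l₂.Pairwise (· < ·)) (hm : ∀ v, v ∈ l₁ ↔ v ∈ l₂) : l₁ = l₂ := by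
  induction l₁ generalizing l₂ with
  | nil =>
    cases l₂ with
    | nil => rfl
    | cons b t => exact absurd ((hm b).mpr (by simp)) (by simp)
  | cons a t ih =>
    cases l₂ with
    | nil => exact absurd ((hm a).mp (by simp)) (by simp)
    | cons b u =>
      rcases List.pairwise_cons.mp h₁ with ⟨ha, ht⟩
      rcases List.pairwise_cons.mp h₂ with ⟨hb, hu⟩
      have hab : a = b := by
        have hma := List.mem_cons.mp ((hm a).mp (by simp))
        have hmb := List.mem_cons.mp ((hm b).mpr (by simp))
        rcases hma with h1 | h1
        · exact h1
        · rcases hmb with h2 | h2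
          · omega
          · have := ha b h2; have := hb a h1; omega
      subst hab
      have : t = u := by
        apply ih (l₂ := u) <;> try assumption
        intro v
        constructor
        · intro hv
          rcases List.mem_cons.mp ((hm v).mp (List.mem_cons_of_mem a hv)) with h | h
          · exact absurd (ha v hv) (by rw [h]; omega)
          · exact h
        · intro hv
          rcases List.mem_cons.mp ((hm v).mpr (List.mem_cons_of_mem a hv)) with h | h
          · exact absurd (hb v hv) (by rw [h]; omega)
          · exact h
      rw [this]

theorem pvFlatMap_if (dv : List Int) (c : Int → Bool)
    (gr : Int → List (List String × Int)) :
    dv.flatMap (fun v => if c v then gr v else [])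
      = (dv.filter c).flatMap gr := by
  induction dv with
  | nil => rfl
  | cons a t ih =>
    by_cases hc : c a = true <;> simp [hc, ih]

theorem pvInsertBy_cons (bef : (List String × Int) → (List String × Int) → Bool)
    (x y : List String × Int) (ys : List (List String × Int)) :
    PySem.List.insertBy bef x (y :: ys)
      = if bef x y then x :: y :: ys else y :: PySem.List.insertBy bef x ys := rfl

theorem pvInsertBy_split (bef : (List String × Int) → (List String × Int) → Bool)
    (x : List String × Int) (u w : List (List String × Int))
    (hu : ∀ y ∈ u, bef x y = false) (hw : ∀ y ∈ w, bef x y = true) :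
    PySem.List.insertBy bef x (u ++ w) = u ++ x :: w := by
  induction u with
  | nil =>
    cases w with
    | nil => rfl
    | cons b t => simp [pvInsertBy_cons, hw b (by simp)]
  | cons a s ih =>
    have ha : bef x a = false := hu a (by simp)
    simp only [List.cons_append, pvInsertBy_cons, ha, Bool.false_eq_true, if_neg, not_false_iff]
    rw [ih fun y hy => hu y (by simp [hy])]

theorem pvSorted_append_singleton (l : List (List String × Int)) (x : List String × Int)
    (key : (List String × Int) → Int) :
    PySem.List.sorted (l ++ [x]) key
      = PySem.List.insertBy (fun a b => decide (key a < key b)) x (PySem.List.sorted l key) := by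
  rw [PySem.List.sorted_eq_foldl_insertBy, PySem.List.sorted_eq_foldl_insertBy, List.foldl_append]
  rfl

theorem pvSorted_eq_flatMap_groups (key : (List String × Int) → Int)
    (l : List (List String × Int)) (dv : List Int) (hp : dv.Pairwise (· < ·))
    (hm : ∀ v, v ∈ dv ↔ v ∈ l.map key) :
    PySem.List.sorted l key = dv.flatMap (fun v => l.filter (fun p => key p == v)) := by
  induction l using List.reverseRecOn generalizing dv with
  | nil =>
    cases dv with
    | nil => rfl
    | cons v t => exact absurd ((hm v).mp (by simp)) (by simp)
  | append_singleton l' x ih =>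
    have hma : key x ∈ dv := (hm (key x)).mpr (by simp)
    obtain ⟨d₁, d₂, rfl⟩ := List.append_of_mem hma
    rcases List.pairwise_append.mp hp with ⟨hp₁, hp₂', hcross⟩
    rcases List.pairwise_cons.mp hp₂' with ⟨ha₂, hp₂⟩
    have hd₁lt : ∀ v ∈ d₁, v < key x := fun v hv => hcross v hv (key x) (by simp)
    -- the distinct-value list for l'
    set mid : List Int := if key x ∈ l'.map key then [key x] else [] with hmid
    have hm' : ∀ v, v ∈ d₁ ++ mid ++ d₂ ↔ v ∈ l'.map key := by
      intro v
      constructor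
      · intro hv
        rcases List.mem_append.mp hv with hv' | hv₂
        · rcases List.mem_append.mp hv' with hv₁ | hvm
          · have hne : v ≠ key x := by have := hd₁lt v hv₁; omega
            have : v ∈ (l' ++ [x]).map key := (hm v).mp (by simp [hv₁])
            simp only [List.map_append, List.mem_append] at this
            rcases this with h | h
            · exact h
            · simp at h; omega
          · rw [hmid] at hvm
            by_cases hin : key x ∈ l'.map key
            · simp [hin] at hvm; subst hvm; exact hin
            · simp [hin] at hvm
        · have hne : v ≠ key x := by have := ha₂ v hv₂; omega
          have : v ∈ (l' ++ [x]).map key := (hm v).mp (by simp [hv₂])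
          simp only [List.map_append, List.mem_append] at this
          rcases this with h | h
          · exact h
          · simp at h; omega
      · intro hv
        have : v ∈ d₁ ++ key x :: d₂ := (hm v).mpr (by simp [hv])
        by_cases hva : v = key x
        · subst hva
          rw [hmid]
          simp [hv]
        · rcases List.mem_append.mp this with h | h
          · simp [h]
          · rcases List.mem_cons.mp h with h' | h'
            · exact absurd h' hva
            · simp [h']
    have hp' : (d₁ ++ mid ++ d₂).Pairwise (· < ·) := by
      apply List.pairwise_append.mpr
      refine ⟨List.pairwise_append.mpr ⟨hp₁, ?_, ?_⟩, hp₂, ?_⟩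
      · rw [hmid]; split <;> simp
      · intro v hv w hw
        rw [hmid] at hw
        by_cases hin : key x ∈ l'.map key
        · simp [hin] at hw; subst hw; exact hd₁lt v hv
        · simp [hin] at hw
      · intro v hv w hw
        rcases List.mem_append.mp hv with h | h
        · exact hcross v h w (by simp [hw])
        · rw [hmid] at h
          by_cases hin : key x ∈ l'.map key
          · simp [hin] at h; subst h; exact ha₂ w hw
          · simp [hin] at h
    have hIH := ih (d₁ ++ mid ++ d₂) hp' hm'
    rw [pvSorted_append_singleton, hIH]
    -- split the grouped list around the insertion point of x
    rw [List.flatMap_append, List.flatMap_append]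
    rw [pvInsertBy_split (fun a b => decide (key a < key b)) x
        (d₁.flatMap (fun v => l'.filter (fun p => key p == v))
          ++ mid.flatMap (fun v => l'.filter (fun p => key p == v)))
        (d₂.flatMap (fun v => l'.filter (fun p => key p == v)))
        ?_ ?_]
    · -- now show list equality with the grouped form of l' ++ [x] over d₁ ++ key x :: d₂
      have hgr : ∀ v, (l' ++ [x]).filter (fun p => key p == v)
          = l'.filter (fun p => key p == v) ++ (if key x = v then [x] else []) := by
        intro v
        rw [List.filter_append]
        congr 1
        by_cases hv : key x = v <;> simp [hv]
      have hgr₁ : ∀ v ∈ d₁, (l' ++ [x]).filter (fun p => key p == v)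
          = l'.filter (fun p => key p == v) := by
        intro v hv
        rw [hgr v]
        have := hd₁lt v hv
        simp only [if_neg (by omega : ¬ key x = v)]
        simp
      have hgr₂ : ∀ v ∈ d₂, (l' ++ [x]).filter (fun p => key p == v)
          = l'.filter (fun p => key p == v) := by
        intro v hv
        rw [hgr v]
        have := ha₂ v hv
        simp only [if_neg (by omega : ¬ key x = v)]
        simp
      have hmidgr : mid.flatMap (fun v => l'.filter (fun p => key p == v)) ++ [x]
          = (l' ++ [x]).filter (fun p => key p == key x) := by
        rw [hgr (key x), if_pos rfl, hmid]
        by_cases hin : key x ∈ l'.map key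
        · simp [hin]
        · have : l'.filter (fun p => key p == key x) = [] := by
            apply List.filter_eq_nil_iff.mpr
            intro p hp
            simp only [beq_iff_eq]
            intro hkp
            exact hin (by exact List.mem_map.mpr ⟨p, hp, hkp⟩)
          simp [hin, this]
      conv_rhs => rw [List.flatMap_append, List.flatMap_cons]
      rw [List.flatMap_congr hgr₁, List.flatMap_congr hgr₂, ← hmidgr]
      simp [List.append_assoc]
    · intro y hy
      rcases List.mem_append.mp hy with h | h
      · rcases List.mem_flatMap.mp h with ⟨v, hv, hyv⟩
        have : key y = v := by simpa using (List.mem_filter.mp hyv).2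
        have := hd₁lt v hv
        simp only [decide_eq_false_iff_not]
        omega
      · rcases List.mem_flatMap.mp h with ⟨v, hv, hyv⟩
        have hky : key y = v := by simpa using (List.mem_filter.mp hyv).2
        rw [hmid] at hv
        by_cases hin : key x ∈ l'.map key
        · simp [hin] at hv
          simp only [decide_eq_false_iff_not]
          omega
        · simp [hin] at hv
    · intro y hy
      rcases List.mem_flatMap.mp hy with ⟨v, hv, hyv⟩
      have : key y = v := by simpa using (List.mem_filter.mp hyv).2
      have := ha₂ v hv
      simp only [decide_eq_true_eq]
      omega

theorem pvALoop_eq (scfi : List (List String × Int)) (n : Int) (vs : List Int)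
    (numAdded : Int) (acc : List (List String × Int)) (s : PySem.Set (List String)) :
    pvALoop scfi n vs numAdded (acc, s)
      = acc ++ (pvSelGrow s (((vs.take (n - numAdded).toNat).flatMap
          (fun c => scfi.filter (fun p => p.2 == -c))))).1 := by
  induction vs generalizing numAdded acc s with
  | nil => simp [pvALoop, pvSelGrow]
  | cons c rest ih =>
    by_cases hlt : numAdded < n
    · have hm : (n - numAdded).toNat = (n - (numAdded + 1)).toNat + 1 := by omega
      simp only [pvALoop, hlt, if_pos]
      rw [pvScan_eq (fun p => p.2 == -c) scfi acc s, ih]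
      rw [hm, List.take_succ_cons, List.flatMap_cons, pvSelGrow_append]
      simp
    · have hm : (n - numAdded).toNat = 0 := by omega
      simp [pvALoop, hlt, hm, pvSelGrow]

theorem pvSelGrow_groups_filter_ne (l : List (List String × Int))
    (key : (List String × Int) → Int) (vs : List Int) (s : PySem.Set (List String)) (a : Int)
    (h : ∀ p ∈ l, key p = a → p.1 ∈ s) :
    (pvSelGrow s (vs.flatMap (fun v => l.filter (fun p => key p == v)))).1
      = (pvSelGrow s ((vs.filter (fun v => v ≠ a)).flatMap
          (fun v => l.filter (fun p => key p == v)))).1 := by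
  induction vs generalizing s with
  | nil => rfl
  | cons v t ih =>
    by_cases hva : v = a
    · subst hva
      have hall : pvSelGrow s (l.filter (fun p => key p == v)) = ([], s) := by
        apply pvSelGrow_all_mem
        intro p hp
        rcases List.mem_filter.mp hp with ⟨hpl, hpk⟩
        exact h p hpl (by simpa using hpk)
      rw [List.flatMap_cons, pvSelGrow_append, hall]
      simp only [List.filter_cons]
      rw [if_neg (by simp)]
      simpa using ih s h
    · rw [List.flatMap_cons, pvSelGrow_append]
      have hfc : (v :: t).filter (fun v => v ≠ a) = v :: t.filter (fun v => v ≠ a) := by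
        simp [hva]
      rw [hfc, List.flatMap_cons, pvSelGrow_append]
      dsimp only
      congr 1
      apply ih
      intro p hpl hpk
      exact pvSelGrow_snd_mem _ _ _ (Or.inl (h p hpl hpk))

theorem pvSelGrow_groups_distinct (l : List (List String × Int))
    (key : (List String × Int) → Int) (vs : List Int) (s : PySem.Set (List String)) :
    (pvSelGrow s (vs.flatMap (fun v => l.filter (fun p => key p == v)))).1
      = (pvSelGrow s ((pvDistinct vs).flatMap (fun v => l.filter (fun p => key p == v)))).1 := by
  induction vs generalizing s with
  | nil => rfl
  | cons v t ih =>
    show _ = (pvSelGrow s ((v :: (pvDistinct t).filter (fun w => w ≠ v)).flatMap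
        (fun v => l.filter (fun p => key p == v)))).1
    rw [List.flatMap_cons, pvSelGrow_append, List.flatMap_cons, pvSelGrow_append]
    dsimp only
    congr 1
    rw [ih]
    apply pvSelGrow_groups_filter_ne
    intro p hpl hpk
    apply pvSelGrow_snd_mem
    right
    exact ⟨p, List.mem_filter.mpr ⟨hpl, by simpa using hpk⟩, rfl⟩


theorem pvFilter_flatMap (dv : List Int) (gr : Int → List (List String × Int))
    (cond : List String × Int → Bool) :
    (dv.flatMap gr).filter cond = dv.flatMap (fun v => (gr v).filter cond) := by
  induction dv with
  | nil => rfl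
  | cons a t ih => simp [List.filter_append, ih]

-- ===== VERDICT (by name: the statement is the Claim_ definition above) =====
theorem modified_get_frequent_spec : Claim_equal_modified_get_frequent := by
  intro itemsets transactions n_itemsets order _hDom _hPre
  unfold Spec_modified_get_frequent
  simp only [modified_get_frequent, modified_get_frequent_alt]
  have hpairs : itemsets.map (fun itemset => (itemset, pvCountOccAlt itemset transactions))
      = itemsets.map (fun itemset => (itemset, pvCountOcc itemset transactions)) := by
    simp [pvCountOcc_eq]
  rw [hpairs]
  set scfi := itemsets.map (fun itemset => (itemset, pvCountOcc itemset transactions)) with hscfi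
  by_cases hn : n_itemsets ≤ 0
  · rw [if_pos (Or.inl hn)]
    rw [pvALoop_eq]
    have h0 : (n_itemsets - 0).toNat = 0 := by omega
    rw [h0]
    simp [pvSelGrow, PySem.List.sorted_eq_foldl_insertBy]
  by_cases hits : itemsets = []
  · subst hits
    rw [if_pos (Or.inr (by simp [hscfi]))]
    simp [hscfi, pvALoop, PySem.List.sorted_eq_foldl_insertBy]
  -- main case
  push Not at hn
  have hscne : scfi ≠ [] := by simp [hscfi, hits]
  have hNpos : 0 < scfi.length := List.length_pos_iff.mpr hscne
  rw [if_neg (by push Not; exact ⟨by omega, hscne⟩)]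
  set valsAsc := PySem.List.sorted (scfi.map (fun item => -item.2)) (fun c => c) with hvals
  have hlenV : valsAsc.length = scfi.length := by
    rw [hvals, PySem.List.length_sorted, List.length_map]
  set j : Nat := (min n_itemsets (scfi.length : Int) - 1).toNat with hjdef
  have hjlt : j < valsAsc.length := by rw [hlenV]; omega
  have hVle : valsAsc.Pairwise (· ≤ ·) := by
    rw [hvals]; exact PySem.List.sorted_pairwise _ _
  -- the threshold is the negation of the j-th ascending negated count
  have hcd : PySem.List.sorted (scfi.map (fun p => p.2)) (fun c => c) true
      = valsAsc.map (fun v => -v) := by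
    apply List.Perm.eq_of_pairwise (le := fun (a b : Int) => b ≤ a)
    · intro a b _ _ h1 h2; omega
    · exact PySem.List.sorted_pairwise_rev _ _
    · rw [List.pairwise_map]
      exact hVle.imp (by intro a b h; omega)
    · refine (PySem.List.sorted_perm _ _ _).trans ?_
      have h2 := ((PySem.List.sorted_perm (scfi.map (fun item => -item.2))
        (fun c => c) false).map (fun v : Int => -v)).symm
      rw [List.map_map] at h2
      have h3 : (List.map ((fun v : Int => -v) ∘ fun item : List String × Int => -item.2) scfi)
          = scfi.map (fun p => p.2) := by
        apply List.map_congr_left; intro p _; simp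
      rw [h3] at h2
      exact h2
  have hthr : (PySem.List.pyGet? (PySem.List.sorted (scfi.map (fun p => p.2)) (fun c => c) true)
        (min n_itemsets (scfi.length : Int) - 1)).getD 0 = -valsAsc[j] := by
    have hcast : min n_itemsets (scfi.length : Int) - 1 = (j : Int) := by omega
    rw [hcast, PySem.List.pyGet?_natCast, hcd]
    rw [List.getElem?_eq_getElem (by simpa using hjlt)]
    simp
  have hmono : ∀ (p q : Nat) (hpq : p ≤ q) (hq : q < valsAsc.length),
      valsAsc[p]'(by omega) ≤ valsAsc[q]'hq := by
    intro p q hpq hq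
    exact PySem.List.sorted_id_getElem_mono _ hpq hq
  have hmemtake : ∀ v, v ∈ valsAsc.take n_itemsets.toNat ↔ (v ∈ valsAsc ∧ v ≤ valsAsc[j]'hjlt) := by
    intro v
    constructor
    · intro hv
      obtain ⟨i, hi, hvi⟩ := List.mem_iff_getElem.mp hv
      have hlt : i < min n_itemsets.toNat valsAsc.length := by simpa using hi
      rw [List.getElem_take] at hvi
      have hij : i ≤ j := by omega
      refine ⟨hvi ▸ List.getElem_mem _, ?_⟩
      have := hmono i j hij hjlt
      omega
    · rintro ⟨hv, hle⟩
      obtain ⟨i, hi, hvi⟩ := List.mem_iff_getElem.mp hv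
      by_cases hij : i ≤ j
      · rw [List.mem_iff_getElem]
        refine ⟨i, by simp [List.length_take]; omega, ?_⟩
        rw [List.getElem_take]; exact hvi
      · have h1 := hmono j i (by omega) hi
        rw [List.mem_iff_getElem]
        refine ⟨j, by simp [List.length_take]; omega, ?_⟩
        rw [List.getElem_take]; omega
  -- A side
  rw [pvALoop_eq]
  have hm0 : (n_itemsets - 0).toNat = n_itemsets.toNat := by omega
  rw [hm0]
  have hbeq : ∀ (a c : Int), (a == -c) = (-a == c) := by
    intro a c
    by_cases h : a = -c
    · simp [h]
    · have h2 : ¬ -a = c := by omega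
      simp [h, h2]
  have hgrA : (valsAsc.take n_itemsets.toNat).flatMap (fun c => scfi.filter (fun p => p.2 == -c))
      = (valsAsc.take n_itemsets.toNat).flatMap (fun v => scfi.filter (fun p => -p.2 == v)) :=
    List.flatMap_congr (fun c _ => List.filter_congr (fun p _ => hbeq p.2 c))
  rw [hgrA]
  rw [pvSelGrow_groups_distinct scfi (fun p => -p.2) (valsAsc.take n_itemsets.toNat)
    (PySem.Set.ofList [])]
  -- B side
  rw [hthr]
  rw [pvScan_eq (fun p => decide (-valsAsc[j]'hjlt ≤ p.2))]
  have hdv_lt : (pvDistinct valsAsc).Pairwise (· < ·) := pairwise_lt_pvDistinct _ hVle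
  have hsortg : PySem.List.sorted scfi (fun p => -p.2)
      = (pvDistinct valsAsc).flatMap (fun v => scfi.filter (fun p => -p.2 == v)) := by
    apply pvSorted_eq_flatMap_groups _ _ _ hdv_lt
    intro v
    rw [mem_pvDistinct, hvals, PySem.List.mem_sorted]
  rw [hsortg, pvFilter_flatMap]
  have hiff : ∀ v ∈ pvDistinct valsAsc,
      (scfi.filter (fun p => -p.2 == v)).filter (fun p => decide (-valsAsc[j]'hjlt ≤ p.2))
        = if decide (v ≤ valsAsc[j]'hjlt) then scfi.filter (fun p => -p.2 == v) else [] := by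
    intro v _
    by_cases hv : v ≤ valsAsc[j]'hjlt
    · rw [if_pos (by simpa using hv)]
      apply List.filter_eq_self.mpr
      intro p hp
      have : -p.2 = v := by simpa using (List.mem_filter.mp hp).2
      simp only [decide_eq_true_eq]
      omega
    · rw [if_neg (by simpa using hv)]
      apply List.filter_eq_nil_iff.mpr
      intro p hp
      have : -p.2 = v := by simpa using (List.mem_filter.mp hp).2
      simp only [decide_eq_true_eq]
      omega
  rw [List.flatMap_congr hiff, pvFlatMap_if]
  have hdvfin : pvDistinct (valsAsc.take n_itemsets.toNat)
      = (pvDistinct valsAsc).filter (fun v => decide (v ≤ valsAsc[j]'hjlt)) := by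
    apply pvEq_of_pairwise_lt_of_mem_iff
    · exact pairwise_lt_pvDistinct _ (List.Pairwise.sublist (List.take_sublist _ _) hVle)
    · exact List.Pairwise.filter _ hdv_lt
    · intro v
      rw [mem_pvDistinct, hmemtake v, List.mem_filter, mem_pvDistinct]
      constructor
      · rintro ⟨h1, h2⟩; exact ⟨h1, by simpa using h2⟩
      · rintro ⟨h1, h2⟩; exact ⟨h1, by simpa using h2⟩
  rw [hdvfin]
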